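-- pv_equiv track=rewrite | github.com/vito-dim/python_fundamentals_2024_05 | Exercises/14_Text_Processing/solutions.py | checking_ticket
-- ===== SOURCE A (Python) =====
-- def checking_ticket(ticket):
--     if len(ticket) != 20:
--         return "invalid ticket"
--     winning_symbols = ('@', '#', '$', '^')
--     left_part = ticket[:10]
--     right_part = ticket[10:]
--     for current_winning_symbol in winning_symbols:
--         for uninterrupted_winning_symbol_length in range(10, 5, -1):
--             winning_symbol_repetition = current_winning_symbol * uninterrupted_winning_symbol_length
--             if winning_symbol_repetition in left_part and winning_symbol_repetition in right_part:
--                 if uninterrupted_winning_symbol_length == 10: # We have Jackpot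
--                     return f'ticket "{ticket}" - {uninterrupted_winning_symbol_length}{current_winning_symbol} Jackpot!'
--                 # We have winning ticket (no Jackpot)
--                 return f'ticket "{ticket}" - {uninterrupted_winning_symbol_length}{current_winning_symbol}'
--     return f'ticket "{ticket}" - no match'
-- ===== SOURCE B (Python) =====
-- def _longest_run(symbol, text):
--     cur = best = 0
--     for ch in text:
--         cur = cur + 1 if ch == symbol else 0
--         best = max(best, cur)
--     return best
--
--
-- def checking_ticket(ticket):
--     if len(ticket) != 20:
--         return "invalid ticket"
--     left_part = ticket[:10]
--     right_part = ticket[10:]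
--     for symbol in ('@', '#', '$', '^'):
--         m = min(_longest_run(symbol, left_part), _longest_run(symbol, right_part))
--         if m >= 6:
--             if m == 10:
--                 return f'ticket "{ticket}" - {m}{symbol} Jackpot!'
--             return f'ticket "{ticket}" - {m}{symbol}'
--     return f'ticket "{ticket}" - no match'
-- ===== Notes on version B (the rewrite author's own statement) =====
-- stated objective: simpler
-- what changed: Replaces A's nested scan over candidate repetition strings (building each repetition and substring-searching both halves for it) with a single-pass longest-run helper per half: the winning length is min(run in left half, run in right half), reported if it is at least 6.
import Mathlib
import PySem

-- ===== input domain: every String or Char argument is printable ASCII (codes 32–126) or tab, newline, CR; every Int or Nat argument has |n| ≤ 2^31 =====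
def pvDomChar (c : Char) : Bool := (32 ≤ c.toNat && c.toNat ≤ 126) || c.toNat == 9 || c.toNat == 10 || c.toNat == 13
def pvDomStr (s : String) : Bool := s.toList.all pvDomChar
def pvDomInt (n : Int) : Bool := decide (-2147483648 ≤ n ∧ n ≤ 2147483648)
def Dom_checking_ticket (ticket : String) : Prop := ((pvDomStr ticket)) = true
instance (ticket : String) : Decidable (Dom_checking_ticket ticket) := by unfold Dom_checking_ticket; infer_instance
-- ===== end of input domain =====

-- B replaces A's nested substring probes with a single-pass longest-run count per half (simpler).

-- ===== PORT A =====
-- inner loop of A: for k in range(10, 5, -1), test sym*k in both halves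
def pvATry (ticket : String) (left right : List Char) (sym : Char) : List Int → Option String
  | [] => none
  | k :: ks =>
    let rep := PySem.List.pyRepeat [sym] k
    if PySem.Chars.isIn rep left && PySem.Chars.isIn rep right then
      some (if k == 10 then
              "ticket \"" ++ ticket ++ "\" - " ++ PySem.Int.toStr k ++ String.mk [sym] ++ " Jackpot!"
            else
              "ticket \"" ++ ticket ++ "\" - " ++ PySem.Int.toStr k ++ String.mk [sym])
    else pvATry ticket left right sym ks

-- outer loop of A over the winning symbols
def pvALoop (ticket : String) (left right : List Char) : List Char → String
  | [] => "ticket \"" ++ ticket ++ "\" - no match"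
  | sym :: syms =>
    match pvATry ticket left right sym (PySem.List.pyRange 10 5 (-1)) with
    | some r => r
    | none => pvALoop ticket left right syms

def checking_ticket (ticket : String) : String :=
  if PySem.Str.len ticket ≠ 20 then "invalid ticket"
  else
    pvALoop ticket
      (PySem.List.slice ticket.toList none (some 10))
      (PySem.List.slice ticket.toList (some 10) none)
      ['@', '#', '$', '^']

-- ===== PORT B =====
-- _longest_run of Source B: one pass keeping (current run, best run)
def pvStep (c : Char) (st : Nat × Nat) (x : Char) : Nat × Nat :=
  let cur := if x == c then st.1 + 1 else 0
  (cur, max st.2 cur)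

def pvMaxRun (c : Char) (s : List Char) : Nat :=
  (s.foldl (pvStep c) (0, 0)).2

def pvBLoop (ticket : String) (left right : List Char) : List Char → String
  | [] => "ticket \"" ++ ticket ++ "\" - no match"
  | sym :: syms =>
    let m := min (pvMaxRun sym left) (pvMaxRun sym right)
    if 6 ≤ m then
      if m == 10 then
        "ticket \"" ++ ticket ++ "\" - " ++ PySem.Int.toStr (Int.ofNat m) ++ String.mk [sym] ++ " Jackpot!"
      else
        "ticket \"" ++ ticket ++ "\" - " ++ PySem.Int.toStr (Int.ofNat m) ++ String.mk [sym]
    else pvBLoop ticket left right syms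

def checking_ticket_alt (ticket : String) : String :=
  if PySem.Str.len ticket ≠ 20 then "invalid ticket"
  else
    pvBLoop ticket
      (PySem.List.slice ticket.toList none (some 10))
      (PySem.List.slice ticket.toList (some 10) none)
      ['@', '#', '$', '^']

-- ===== PRECONDITION & SPEC =====
def Spec_checking_ticket (ticket : String) (out : String) : Prop := out = checking_ticket_alt ticket
instance (ticket : String) (out : String) : Decidable (Spec_checking_ticket ticket out) := by unfold Spec_checking_ticket; infer_instance

-- ===== CLAIM (what is proved, stated in full; the proofs are below) =====
def Claim_equal_checking_ticket : Prop := ∀ (ticket : String), Dom_checking_ticket ticket → Spec_checking_ticket ticket (checking_ticket ticket)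

-- ===== LEMMAS AND PROOFS =====

-- ghost recursive form of the longest-run scan
def pvMR (c : Char) (cur : Nat) : List Char → Nat
  | [] => cur
  | x :: xs => if x = c then pvMR c (cur + 1) xs else max cur (pvMR c 0 xs)

theorem pvMR_le (c : Char) (s : List Char) : ∀ cur, cur ≤ pvMR c cur s := by
  induction s with
  | nil => intro cur; simp [pvMR]
  | cons x xs ih =>
    intro cur
    by_cases h : x = c
    · simpa [pvMR, h] using le_trans (Nat.le_succ cur) (ih (cur + 1))
    · simp [pvMR, h]

theorem pvMaxRun_foldl (c : Char) (s : List Char) :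
    ∀ cur best, cur ≤ best →
      (s.foldl (pvStep c) (cur, best)).2 = max best (pvMR c cur s) := by
  induction s with
  | nil => intro cur best h; simp [pvMR, Nat.max_eq_left h]
  | cons x xs ih =>
    intro cur best h
    by_cases hx : x = c
    · have e : pvStep c (cur, best) x = (cur + 1, max best (cur + 1)) := by
        simp [pvStep, hx]
      have h2 := pvMR_le c xs (cur + 1)
      rw [List.foldl_cons, e, ih (cur + 1) (max best (cur + 1)) (le_max_right _ _)]
      simp only [pvMR, if_pos hx]
      omega
    · have e : pvStep c (cur, best) x = (0, max best 0) := by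
        simp [pvStep, hx]
      rw [List.foldl_cons, e, ih 0 (max best 0) (Nat.zero_le _)]
      simp only [pvMR, if_neg hx]
      omega

theorem pvMaxRun_eq (c : Char) (s : List Char) : pvMaxRun c s = pvMR c 0 s := by
  simpa [pvMaxRun] using pvMaxRun_foldl c s 0 0 le_rfl

theorem pvMR_mono (c : Char) (s : List Char) :
    ∀ {cur cur'}, cur ≤ cur' → pvMR c cur s ≤ pvMR c cur' s := by
  induction s with
  | nil => intro cur cur' h; simpa [pvMR] using h
  | cons x xs ih =>
    intro cur cur' h
    by_cases hx : x = c
    · simpa [pvMR, hx] using ih (by omega)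
    · simp only [pvMR, if_neg hx]
      exact max_le_max h le_rfl

theorem pvMR_append (c : Char) (s t : List Char) :
    ∀ cur, pvMR c cur s ≤ pvMR c cur (s ++ t) := by
  induction s with
  | nil => intro cur; simpa [pvMR] using pvMR_le c t cur
  | cons x xs ih =>
    intro cur
    by_cases hx : x = c
    · simpa [pvMR, hx] using ih (cur + 1)
    · simp only [List.cons_append, pvMR, if_neg hx]
      exact max_le_max le_rfl (ih 0)

theorem pvMR_prepend (c : Char) (t s : List Char) :
    pvMR c 0 s ≤ pvMR c 0 (t ++ s) := by
  induction t with
  | nil => simp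
  | cons x ts ih =>
    by_cases hx : x = c
    · calc pvMR c 0 s ≤ pvMR c 0 (ts ++ s) := ih
        _ ≤ pvMR c 1 (ts ++ s) := pvMR_mono c _ (by omega)
        _ = pvMR c 0 (x :: ts ++ s) := by simp [pvMR, hx]
    · simp only [List.cons_append, pvMR, if_neg hx]
      exact le_trans ih (le_max_right _ _)

theorem pvMR_replicate (c : Char) (k : Nat) :
    ∀ cur, pvMR c cur (List.replicate k c) = cur + k := by
  induction k with
  | zero => intro cur; simp [pvMR]
  | succ n ih => intro cur; simp [List.replicate_succ, pvMR, ih]; omega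

theorem pvMR_le_length (c : Char) (s : List Char) : ∀ cur, pvMR c cur s ≤ cur + s.length := by
  induction s with
  | nil => intro cur; simp [pvMR]
  | cons x xs ih =>
    intro cur
    by_cases hx : x = c
    · have := ih (cur + 1); simp [pvMR, hx]; omega
    · have := ih 0; simp [pvMR, hx]; omega

theorem rep_infix_of_le (c : Char) (s : List Char) {k : Nat} (h : k ≤ pvMR c 0 s) :
    List.replicate k c <:+: s := by
  have hbig : List.replicate (pvMR c 0 s) c <:+: s := by
    suffices H : ∀ (s : List Char) (cur : Nat),
        List.replicate (pvMR c cur s) c <:+: List.replicate cur c ++ s by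
      simpa using H s 0
    intro s
    induction s with
    | nil => intro cur; simp [pvMR]
    | cons x xs ih =>
      intro cur
      by_cases hx : x = c
      · have := ih (cur + 1)
        rw [List.replicate_succ' (n := cur)] at this
        simpa [pvMR, hx] using this
      · simp only [pvMR, if_neg hx]
        rcases Nat.le_total (pvMR c 0 xs) cur with hle | hle
        · rw [Nat.max_eq_left hle]
          exact (List.prefix_append _ _).isInfix
        · rw [Nat.max_eq_right hle]
          have := ih 0
          simp only [List.replicate_zero, List.nil_append] at this
          exact this.trans ((List.suffix_cons x xs).isInfix.trans
            (List.suffix_append _ _).isInfix)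
  refine List.IsInfix.trans ?_ hbig
  refine ⟨[], List.replicate (pvMR c 0 s - k) c, ?_⟩
  rw [List.nil_append, ← List.replicate_add, Nat.add_sub_cancel' h]

theorem le_of_rep_infix (c : Char) (s : List Char) {k : Nat}
    (h : List.replicate k c <:+: s) : k ≤ pvMR c 0 s := by
  obtain ⟨t, u, rfl⟩ := h
  calc k = pvMR c 0 (List.replicate k c) := by simpa using (pvMR_replicate c k 0).symm
    _ ≤ pvMR c 0 (List.replicate k c ++ u) := pvMR_append c _ u 0
    _ ≤ pvMR c 0 (t ++ (List.replicate k c ++ u)) := pvMR_prepend c t _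
    _ = pvMR c 0 (t ++ List.replicate k c ++ u) := by rw [List.append_assoc]

theorem isIn_rep (c : Char) (s : List Char) (k : Nat) :
    PySem.Chars.isIn (List.replicate k c) s = decide (k ≤ pvMaxRun c s) := by
  rw [pvMaxRun_eq]
  by_cases h : k ≤ pvMR c 0 s
  · simp [h, (PySem.Chars.isIn_iff_infix _ _).2 (rep_infix_of_le c s h)]
  · simp [h, (PySem.Chars.isIn_eq_false_iff _ _).2 (fun hin => h (le_of_rep_infix c s hin))]

theorem pvMaxRun_le_length (c : Char) (s : List Char) : pvMaxRun c s ≤ s.length := by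
  rw [pvMaxRun_eq]; simpa using pvMR_le_length c s 0

theorem pvATry_eq (ticket : String) (left right : List Char) (sym : Char)
    (hl : pvMaxRun sym left ≤ 10) (_hr : pvMaxRun sym right ≤ 10) :
    pvATry ticket left right sym (PySem.List.pyRange 10 5 (-1)) =
      (if 6 ≤ min (pvMaxRun sym left) (pvMaxRun sym right) then
        some (if min (pvMaxRun sym left) (pvMaxRun sym right) == 10 then
          "ticket \"" ++ ticket ++ "\" - " ++
            PySem.Int.toStr (Int.ofNat (min (pvMaxRun sym left) (pvMaxRun sym right))) ++
            String.mk [sym] ++ " Jackpot!"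
        else
          "ticket \"" ++ ticket ++ "\" - " ++
            PySem.Int.toStr (Int.ofNat (min (pvMaxRun sym left) (pvMaxRun sym right))) ++
            String.mk [sym])
       else none) := by
  have hrange : PySem.List.pyRange 10 5 (-1) = [10, 9, 8, 7, 6] := by decide
  rw [hrange]
  have key : ∀ k : Nat,
      (PySem.Chars.isIn (List.replicate k sym) left &&
       PySem.Chars.isIn (List.replicate k sym) right) =
      decide (k ≤ min (pvMaxRun sym left) (pvMaxRun sym right)) := by
    intro k
    rw [isIn_rep, isIn_rep]
    by_cases h1 : k ≤ pvMaxRun sym left <;> by_cases h2 : k ≤ pvMaxRun sym right <;>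
      simp [h1, h2]
  have e10 : PySem.List.pyRepeat [sym] (10 : Int) = List.replicate 10 sym := by
    simp [PySem.List.pyRepeat_singleton]
  have e9 : PySem.List.pyRepeat [sym] (9 : Int) = List.replicate 9 sym := by
    simp [PySem.List.pyRepeat_singleton]
  have e8 : PySem.List.pyRepeat [sym] (8 : Int) = List.replicate 8 sym := by
    simp [PySem.List.pyRepeat_singleton]
  have e7 : PySem.List.pyRepeat [sym] (7 : Int) = List.replicate 7 sym := by
    simp [PySem.List.pyRepeat_singleton]
  have e6 : PySem.List.pyRepeat [sym] (6 : Int) = List.replicate 6 sym := by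
    simp [PySem.List.pyRepeat_singleton]
  have hm10 : min (pvMaxRun sym left) (pvMaxRun sym right) ≤ 10 :=
    le_trans (min_le_left _ _) hl
  simp only [pvATry, e10, e9, e8, e7, e6, key]
  generalize min (pvMaxRun sym left) (pvMaxRun sym right) = m at hm10 ⊢
  by_cases h6 : 6 ≤ m
  · interval_cases m <;> simp
  · have : m < 6 := by omega
    interval_cases m <;> simp

theorem pvLoop_eq (ticket : String) (left right : List Char)
    (hl : left.length ≤ 10) (hr : right.length ≤ 10) :
    ∀ syms, pvALoop ticket left right syms = pvBLoop ticket left right syms := by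
  intro syms
  induction syms with
  | nil => rfl
  | cons sym syms ih =>
    have hl' : pvMaxRun sym left ≤ 10 := le_trans (pvMaxRun_le_length sym left) hl
    have hr' : pvMaxRun sym right ≤ 10 := le_trans (pvMaxRun_le_length sym right) hr
    rw [pvALoop, pvBLoop, pvATry_eq ticket left right sym hl' hr']
    by_cases h6 : 6 ≤ min (pvMaxRun sym left) (pvMaxRun sym right)
    · simp [h6]
    · simp [h6, ih]

-- ===== VERDICT (by name: the statement is the Claim_ definition above) =====
theorem checking_ticket_spec : Claim_equal_checking_ticket := by
  intro ticket _
  unfold Spec_checking_ticket checking_ticket checking_ticket_alt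
  by_cases h : PySem.Str.len ticket ≠ 20
  · rw [if_pos h, if_pos h]
  · rw [if_neg h, if_neg h]
    have h20 : ticket.toList.length = 20 := by
      have := not_not.1 h
      simp [PySem.Str.len_eq] at this
      exact_mod_cast this
    apply pvLoop_eq
    · rw [PySem.List.slice_to _ (by norm_num)]
      simpa using List.length_take_le 10 ticket.toList
    · rw [PySem.List.slice_from _ (by norm_num)]
      simp [h20]
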